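-- pv_equiv track=rewrite | github.com/milandas63/GIFT-Intern-Python-3rd-Sem-17-06-2025 | Day-09 (08-07-2025)/db_final.py | padC
-- ===== SOURCE A (Python) =====
-- def padC(data, width):
--     buf = str(data)
--     for i in range(len(buf),width):
--         if(i%2==0):
--             buf = buf + ' '
--         else:
--             buf = ' ' + buf
--     return buf
-- ===== SOURCE B (Python) =====
-- def padC(data, width):
--     s = str(data)
--     n = len(s)
--     if width <= n:
--         return s
--     # indices n..width-1: even ones append a space on the right, odd ones on the left
--     right = (width + 1) // 2 - (n + 1) // 2   # count of even i in [n, width)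
--     left = width // 2 - n // 2                # count of odd i in [n, width)
--     return ' ' * left + s + ' ' * right
-- ===== Notes on version B (the rewrite author's own statement) =====
-- stated objective: simpler
-- what changed: Replaces the per-index loop that appends/prepends one space at a time with closed-form parity counts over [len(s), width) and a single concatenation ' '*left + s + ' '*right.
import Mathlib
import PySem

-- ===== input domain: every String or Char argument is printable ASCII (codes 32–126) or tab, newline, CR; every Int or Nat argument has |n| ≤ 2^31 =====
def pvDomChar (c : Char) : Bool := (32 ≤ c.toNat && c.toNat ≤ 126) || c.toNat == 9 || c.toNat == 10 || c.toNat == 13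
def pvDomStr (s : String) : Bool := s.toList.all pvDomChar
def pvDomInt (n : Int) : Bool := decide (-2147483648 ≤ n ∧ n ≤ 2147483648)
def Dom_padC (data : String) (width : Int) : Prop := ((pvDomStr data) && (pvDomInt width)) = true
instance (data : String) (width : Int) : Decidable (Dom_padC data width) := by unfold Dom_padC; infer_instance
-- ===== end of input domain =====

-- B pads to `width` by one build from closed-form left/right space counts instead of A's
-- per-index append/prepend loop (objective: simpler); same return value everywhere.

-- ===== PORT A =====
-- A's loop over range(len(buf), width); buf kept as List Char ('buf + " "' = buf ++ [' '],
-- '" " + buf' = ' ' :: buf), materialised as a String at the end.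
def padC (data : String) (width : Int) : String :=
  String.ofList ((PySem.List.pyRange (data.toList.length : Int) width 1).foldl
    (fun buf i => if PySem.Int.mod i 2 = 0 then buf ++ [' '] else ' ' :: buf) data.toList)

-- ===== PORT B =====
def padC_alt (data : String) (width : Int) : String :=
  if width ≤ (data.toList.length : Int) then data
  else
    String.ofList
      (List.replicate (PySem.Int.floordiv width 2
          - PySem.Int.floordiv (data.toList.length : Int) 2).toNat ' '
        ++ data.toList
        ++ List.replicate (PySem.Int.floordiv (width + 1) 2
          - PySem.Int.floordiv ((data.toList.length : Int) + 1) 2).toNat ' ')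

-- ===== PRECONDITION & SPEC =====
def Spec_padC (data : String) (width : Int) (out : String) : Prop := out = padC_alt data width
instance (data : String) (width : Int) (out : String) : Decidable (Spec_padC data width out) := by unfold Spec_padC; infer_instance

-- ===== CLAIM (what is proved, stated in full; the proofs are below) =====
def Claim_equal_padC : Prop := ∀ (data : String) (width : Int), Dom_padC data width → Spec_padC data width (padC data width)

-- ===== LEMMAS AND PROOFS =====

-- the loop over [n, n+k) produces exactly the parity-counted pads around the initial list
theorem padC_loop (n : ℕ) (l : List Char) : ∀ (k : ℕ),
    (PySem.List.pyRange (n : Int) ((n : Int) + k) 1).foldl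
      (fun buf i => if PySem.Int.mod i 2 = 0 then buf ++ [' '] else ' ' :: buf) l
    = List.replicate ((n + k) / 2 - n / 2) ' ' ++ l
        ++ List.replicate ((n + k + 1) / 2 - (n + 1) / 2) ' ' := by
  intro k
  induction k with
  | zero => simp [PySem.List.pyRange_one_eq_nil]
  | succ k ih =>
    have h1 : (n : Int) ≤ (n : Int) + k := by omega
    have hsplit : ((n : Int) + (k + 1 : ℕ)) = ((n : Int) + k) + 1 := by push_cast; ring
    rw [hsplit, PySem.List.pyRange_one_succ_right h1, List.foldl_append, ih]
    simp only [List.foldl]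
    have hmod : PySem.Int.mod ((n : Int) + k) 2 = (((n + k) % 2 : ℕ) : Int) := by
      simp [PySem.Int.mod, Int.fmod_eq_emod]
    by_cases hp : (n + k) % 2 = 0
    · rw [hmod, hp]
      simp only [Nat.cast_zero, List.append_assoc]
      have e1 : (n + (k + 1)) / 2 - n / 2 = (n + k) / 2 - n / 2 := by omega
      have e2 : (n + (k + 1) + 1) / 2 - (n + 1) / 2
          = ((n + k + 1) / 2 - (n + 1) / 2) + 1 := by omega
      rw [e1, e2, List.replicate_succ']
      simp
    · have hp1 : (n + k) % 2 = 1 := by omega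
      rw [hmod, hp1]
      have hne : ((1 : ℕ) : Int) ≠ 0 := by norm_num
      rw [if_neg hne]
      have e1 : (n + (k + 1)) / 2 - n / 2 = ((n + k) / 2 - n / 2) + 1 := by omega
      have e2 : (n + (k + 1) + 1) / 2 - (n + 1) / 2 = (n + k + 1) / 2 - (n + 1) / 2 := by omega
      rw [e1, e2, List.replicate_succ]
      simp

-- ===== VERDICT (by name: the statement is the Claim_ definition above) =====
theorem padC_spec : Claim_equal_padC := by
  unfold Claim_equal_padC
  intro data width _
  unfold Spec_padC padC padC_alt
  by_cases h : width ≤ (data.toList.length : Int)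
  · rw [if_pos h, PySem.List.pyRange_one_eq_nil h]
    exact String.ofList_toList
  · rw [if_neg h]
    push Not at h
    obtain ⟨k, hk⟩ : ∃ k : ℕ, width = (data.toList.length : Int) + k :=
      ⟨(width - data.toList.length).toNat, by omega⟩
    have h1 : (PySem.Int.floordiv ((data.toList.length : Int) + k) 2
          - PySem.Int.floordiv (data.toList.length : Int) 2).toNat
        = (data.toList.length + k) / 2 - data.toList.length / 2 := by
      simp [PySem.Int.floordiv, Int.fdiv_eq_ediv]; omega
    have h2 : (PySem.Int.floordiv ((data.toList.length : Int) + k + 1) 2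
          - PySem.Int.floordiv ((data.toList.length : Int) + 1) 2).toNat
        = (data.toList.length + k + 1) / 2 - (data.toList.length + 1) / 2 := by
      simp [PySem.Int.floordiv, Int.fdiv_eq_ediv]; omega
    rw [hk, padC_loop, h1, h2]
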